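-- pv_equiv track=rewrite | github.com/YipLab/Spheroid_Analysis | spheroid_analysis_linking.py | max_res
-- ===== SOURCE A (Python) =====
-- def max_res (res5): # obtain maxium possible image dimension after conforming
--
--     max_0 = 0
--     max_1 = 0
--     max_2 = 0
--
--     # maximum dimension on three axis
--
--     for i in range(len(res5)):
--         if res5[i][0] > max_0:
--             max_0 = res5[i][0]
--         if res5[i][1] > max_1:
--             max_1 = res5[i][1]
--         if res5[i][2] > max_2:
--             max_2 = res5[i][2]
--
--     return [max_0, max_1, max_2]
-- ===== SOURCE B (Python) =====
-- def max_res(res5):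
--     # column-wise maxima, each column scanned independently, seeded with 0
--     return [max([0] + [row[j] for row in res5]) for j in range(3)]
-- ===== Notes on version B (the rewrite author's own statement) =====
-- stated objective: simpler
-- what changed: Replaces the single row-wise pass keeping three running maxima with three independent column-major scans, each taking max of the column seeded with 0.
import Mathlib
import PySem

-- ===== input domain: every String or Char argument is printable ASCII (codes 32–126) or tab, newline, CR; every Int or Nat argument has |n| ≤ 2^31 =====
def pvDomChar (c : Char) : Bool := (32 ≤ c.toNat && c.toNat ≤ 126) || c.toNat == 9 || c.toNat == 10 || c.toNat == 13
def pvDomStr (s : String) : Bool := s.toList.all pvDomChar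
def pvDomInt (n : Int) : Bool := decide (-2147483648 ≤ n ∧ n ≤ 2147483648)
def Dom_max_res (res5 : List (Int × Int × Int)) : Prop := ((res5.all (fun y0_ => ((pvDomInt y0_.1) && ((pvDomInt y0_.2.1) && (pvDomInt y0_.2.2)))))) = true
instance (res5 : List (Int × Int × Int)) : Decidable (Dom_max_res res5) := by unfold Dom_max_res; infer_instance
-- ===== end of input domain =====

-- B replaces A's single row-wise pass with three running maxima by three independent
-- column-major scans (objective: simpler); same return value for every input.

-- ===== PORT A =====
-- one pass over the rows, three running maxima updated by `if row[j] > max_j` in order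
def max_res (res5 : List (Int × Int × Int)) : List Int :=
  let st := res5.foldl
    (fun (m : Int × Int × Int) r =>
      let m0 := if r.1 > m.1 then r.1 else m.1
      let m1 := if r.2.1 > m.2.1 then r.2.1 else m.2.1
      let m2 := if r.2.2 > m.2.2 then r.2.2 else m.2.2
      (m0, m1, m2))
    (0, 0, 0)
  [st.1, st.2.1, st.2.2]

-- ===== PORT B =====
-- row[j] on a 3-tuple
def pvCol (r : Int × Int × Int) (j : Nat) : Int :=
  if j = 0 then r.1 else if j = 1 then r.2.1 else r.2.2

-- max([0] + col): Python's max left-folds over the list, first element as seed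
def pvMaxList (xs : List Int) : Int := xs.foldl max 0

def max_res_alt (res5 : List (Int × Int × Int)) : List Int :=
  (List.range 3).map (fun j => pvMaxList (res5.map (fun r => pvCol r j)))

-- ===== PRECONDITION & SPEC =====
def Spec_max_res (res5 : List (Int × Int × Int)) (out : List Int) : Prop := out = max_res_alt res5
instance (res5 : List (Int × Int × Int)) (out : List Int) : Decidable (Spec_max_res res5 out) := by unfold Spec_max_res; infer_instance

-- ===== CLAIM (what is proved, stated in full; the proofs are below) =====
def Claim_equal_max_res : Prop := ∀ (res5 : List (Int × Int × Int)), Dom_max_res res5 → Spec_max_res res5 (max_res res5)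

-- ===== LEMMAS AND PROOFS =====
theorem maxres_fold (res5 : List (Int × Int × Int)) (a b c : Int) :
    res5.foldl
      (fun (m : Int × Int × Int) r =>
        ((if r.1 > m.1 then r.1 else m.1),
         (if r.2.1 > m.2.1 then r.2.1 else m.2.1),
         (if r.2.2 > m.2.2 then r.2.2 else m.2.2)))
      (a, b, c)
    = ((res5.map (·.1)).foldl max a,
       (res5.map (·.2.1)).foldl max b,
       (res5.map (·.2.2)).foldl max c) := by
  induction res5 generalizing a b c with
  | nil => rfl
  | cons r t ih =>
      simp only [List.foldl_cons, List.map_cons, ih]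
      congr 1 <;> [skip; congr 1] <;>
        · congr 1
          simp only [max_def]
          split_ifs <;> omega

-- ===== VERDICT (by name: the statement is the Claim_ definition above) =====
theorem max_res_spec : Claim_equal_max_res := by
  intro res5 _
  unfold Spec_max_res max_res max_res_alt pvMaxList pvCol
  simp [maxres_fold, List.range_succ]
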